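-- pv_equiv track=rewrite | github.com/ommadawn46/z3-picross-solver | picross_solver/pretty_print.py | generate_pretty_str
-- ===== SOURCE A (Python) =====
-- def generate_pretty_str(solution, vertical_hints, horizontal_hints, margin):
--     """
--     解法からピクロス盤面を表す文字列を生成
--     """
--     sp = lambda m: " " * m
--
--     v_max = max(map(len, vertical_hints))
--     h_max = max(map(len, horizontal_hints))
--
--     result = ""
--     for i in range(v_max):
--         result += sp(margin + 1) * h_max
--         for v_numbers in vertical_hints:
--             n_len = len(v_numbers)
--             v_number_str = (
--                 str(v_numbers[i + n_len - v_max]) if i >= v_max - n_len else ""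
--             )
--             result += v_number_str + sp(margin - len(v_number_str) + 1)
--         result += "\n"
--
--     for y in range(len(horizontal_hints)):
--         h_numbers = horizontal_hints[y]
--         result += sp(margin + 1) * (h_max - len(h_numbers))
--         for h_number in h_numbers:
--             h_number_str = str(h_number)
--             result += h_number_str + sp(margin - len(h_number_str) + 1)
--
--         for x in range(len(vertical_hints)):
--             result += ("■" if solution[x][y] else "□") + sp(margin)
--         result += "\n"
--
--     return result.rstrip()
-- ===== SOURCE B (Python) =====
-- def generate_pretty_str(solution, vertical_hints, horizontal_hints, margin):
--     """
--     解法からピクロス盤面を表す文字列を生成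
--     """
--     v_max = max(map(len, vertical_hints))
--     h_max = max(map(len, horizontal_hints))
--     n_rows = v_max + len(horizontal_hints)
--
--     # column-major cell grid: h_max hint columns, then one column per board column,
--     # every cell rendered by ONE uniform width rule (len("■") == len("□") == 1,
--     # so pad gives exactly the board spacing too); rows are read off by transposing.
--     cols = []
--     for c in range(h_max):
--         cols.append(
--             [""] * v_max
--             + [str(h[c + len(h) - h_max]) if c >= h_max - len(h) else ""
--                for h in horizontal_hints]
--         )
--     for x, v in enumerate(vertical_hints):
--         cols.append(
--             [""] * (v_max - len(v))
--             + [str(n) for n in v]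
--             + [("■" if solution[x][y] else "□") for y in range(len(horizontal_hints))]
--         )
--
--     pad = lambda s: s + " " * (margin - len(s) + 1)
--     rows = ("".join(pad(col[r]) for col in cols) for r in range(n_rows))
--     return "\n".join(rows).rstrip()
-- ===== Notes on version B (the rewrite author's own statement) =====
-- stated objective: alternative
-- what changed: B builds a column-major grid of cell strings (each horizontal-hint column stacked over blanks, each vertical hint stacked over its board column), then transposes it into rows with one uniform cell-width rule, instead of A's row-by-row rendering with three separate padding formulas.
import Mathlib
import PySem

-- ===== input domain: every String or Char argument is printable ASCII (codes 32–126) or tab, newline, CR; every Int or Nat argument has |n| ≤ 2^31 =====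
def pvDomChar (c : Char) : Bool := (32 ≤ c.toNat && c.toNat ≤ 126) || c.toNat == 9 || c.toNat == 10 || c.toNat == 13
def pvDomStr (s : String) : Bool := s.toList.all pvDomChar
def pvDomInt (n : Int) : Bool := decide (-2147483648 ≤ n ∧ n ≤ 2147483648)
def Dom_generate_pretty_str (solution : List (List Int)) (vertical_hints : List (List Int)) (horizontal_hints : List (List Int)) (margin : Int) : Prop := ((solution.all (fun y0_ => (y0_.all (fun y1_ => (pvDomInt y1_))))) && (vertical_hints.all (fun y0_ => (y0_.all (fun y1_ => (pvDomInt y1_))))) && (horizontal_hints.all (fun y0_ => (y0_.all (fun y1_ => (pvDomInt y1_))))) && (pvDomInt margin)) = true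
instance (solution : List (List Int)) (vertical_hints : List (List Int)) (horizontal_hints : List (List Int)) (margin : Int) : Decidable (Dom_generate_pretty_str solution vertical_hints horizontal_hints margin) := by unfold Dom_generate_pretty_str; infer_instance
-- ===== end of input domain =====

-- B renders the board from a column-major grid of cell strings (hint columns stacked over
-- blanks, each vertical hint stacked over its board column) transposed into rows with one
-- uniform cell-width rule, instead of A's row-by-row rendering with three padding formulas.

-- ===== PORT A =====
-- " " * m  (empty for m ≤ 0, as in Python)
def pvSp (m : Int) : List Char := List.replicate m.toNat ' '
-- s * n  (string repetition)
def pvRep (s : List Char) (n : Nat) : List Char := (List.replicate n s).flatten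

-- literal transliteration of A; strings are carried as List Char.
-- max(map(len, hints)) is ported as a running max from 0 (exact for nonempty hints, and Pre_
-- excludes the empty lists, on which Python's max raises ValueError).
def generate_pretty_str (solution : List (List Int)) (vertical_hints : List (List Int)) (horizontal_hints : List (List Int)) (margin : Int) : String :=
  let v_max : Nat := (vertical_hints.map (fun v => v.length)).foldl max 0
  let h_max : Nat := (horizontal_hints.map (fun h => h.length)).foldl max 0
  let afterHeader : List Char := (List.range v_max).foldl (fun (result : List Char) (i : Nat) =>
    let result := result ++ pvRep (pvSp (margin + 1)) h_max
    let result := vertical_hints.foldl (fun result v_numbers =>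
      let n_len : Int := v_numbers.length
      let v_number_str : List Char :=
        if (i : Int) ≥ (v_max : Int) - n_len then
          PySem.Int.toChars ((PySem.List.pyGet? v_numbers ((i : Int) + n_len - (v_max : Int))).getD 0)
        else []
      result ++ v_number_str ++ pvSp (margin - (v_number_str.length : Int) + 1)) result
    result ++ ['\n']) []
  let afterBody : List Char := (List.range horizontal_hints.length).foldl (fun (result : List Char) (y : Nat) =>
    let h_numbers : List Int := (PySem.List.pyGet? horizontal_hints (y : Int)).getD []
    let result := result ++ pvRep (pvSp (margin + 1)) (h_max - h_numbers.length)
    let result := h_numbers.foldl (fun result h_number =>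
      let h_number_str := PySem.Int.toChars h_number
      result ++ h_number_str ++ pvSp (margin - (h_number_str.length : Int) + 1)) result
    let result := (List.range vertical_hints.length).foldl (fun (result : List Char) (x : Nat) =>
      result ++ (if ((PySem.List.pyGet? ((PySem.List.pyGet? solution (x : Int)).getD []) (y : Int)).getD 0) ≠ 0 then ['■'] else ['□']) ++ pvSp margin) result
    result ++ ['\n']) afterHeader
  String.mk (PySem.Chars.rstrip afterBody)

-- ===== PORT B =====
-- pad(s) = s + " " * (margin - len(s) + 1)
def pvFmt (margin : Int) (s : List Char) : List Char := s ++ pvSp (margin - (s.length : Int) + 1)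

-- literal transliteration of Source B (same max-port note as for A): build the column-major
-- cell grid, then transpose it into rows, pad every cell with the one width rule, join.
def generate_pretty_str_alt (solution : List (List Int)) (vertical_hints : List (List Int)) (horizontal_hints : List (List Int)) (margin : Int) : String :=
  let v_max : Nat := (vertical_hints.map (fun v => v.length)).foldl max 0
  let h_max : Nat := (horizontal_hints.map (fun h => h.length)).foldl max 0
  let n_rows : Nat := v_max + horizontal_hints.length
  let hintCols : List (List (List Char)) := (List.range h_max).map (fun (c : Nat) =>
    List.replicate v_max ([] : List Char) ++ horizontal_hints.map (fun h =>
      if (c : Int) ≥ (h_max : Int) - (h.length : Int) then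
        PySem.Int.toChars ((PySem.List.pyGet? h ((c : Int) + (h.length : Int) - (h_max : Int))).getD 0)
      else []))
  let vertCols : List (List (List Char)) := (PySem.List.enumerate vertical_hints).map (fun xv =>
    List.replicate (v_max - xv.2.length) ([] : List Char) ++ xv.2.map PySem.Int.toChars ++
      (List.range horizontal_hints.length).map (fun (y : Nat) =>
        if ((PySem.List.pyGet? ((PySem.List.pyGet? solution xv.1).getD []) (y : Int)).getD 0) ≠ 0 then ['■'] else ['□']))
  let cols := hintCols ++ vertCols
  let rows : List (List Char) := (List.range n_rows).map (fun (r : Nat) =>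
    (cols.map (fun col => pvFmt margin (col.getD r []))).flatten)
  String.mk (PySem.Chars.rstrip (PySem.Chars.join ['\n'] rows))

-- ===== PRECONDITION & SPEC =====
-- Pre_ excludes exactly the inputs where Python A raises: empty hint lists (max() of an empty
-- sequence raises ValueError) and a solution grid too small for the hints (IndexError).
def Pre_generate_pretty_str (solution : List (List Int)) (vertical_hints : List (List Int)) (horizontal_hints : List (List Int)) (margin : Int) : Prop :=
  vertical_hints ≠ [] ∧ horizontal_hints ≠ [] ∧
  vertical_hints.length ≤ solution.length ∧
  ∀ row ∈ solution.take vertical_hints.length, horizontal_hints.length ≤ row.length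
instance (solution : List (List Int)) (vertical_hints : List (List Int)) (horizontal_hints : List (List Int)) (margin : Int) : Decidable (Pre_generate_pretty_str solution vertical_hints horizontal_hints margin) := by unfold Pre_generate_pretty_str; infer_instance

def pvWitness_generate_pretty_str : List (List Int) × List (List Int) × List (List Int) × Int :=
  ([[1, 0], [0, 1]], [[1], [1]], [[1], [1]], 0)

def Spec_generate_pretty_str (solution : List (List Int)) (vertical_hints : List (List Int)) (horizontal_hints : List (List Int)) (margin : Int) (out : String) : Prop := out = generate_pretty_str_alt solution vertical_hints horizontal_hints margin
instance (solution : List (List Int)) (vertical_hints : List (List Int)) (horizontal_hints : List (List Int)) (margin : Int) (out : String) : Decidable (Spec_generate_pretty_str solution vertical_hints horizontal_hints margin out) := by unfold Spec_generate_pretty_str; infer_instance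

-- ===== CLAIM (what is proved, stated in full; the proofs are below) =====
def Claim_equal_generate_pretty_str : Prop := ∀ (solution : List (List Int)) (vertical_hints : List (List Int)) (horizontal_hints : List (List Int)) (margin : Int), Dom_generate_pretty_str solution vertical_hints horizontal_hints margin → Pre_generate_pretty_str solution vertical_hints horizontal_hints margin → Spec_generate_pretty_str solution vertical_hints horizontal_hints margin (generate_pretty_str solution vertical_hints horizontal_hints margin)

-- ===== LEMMAS AND PROOFS =====

theorem pv_rstrip_snoc_space (xs : List Char) (c : Char) (hc : PySem.Chars.isspace c = true) :
    PySem.Chars.rstrip (xs ++ [c]) = PySem.Chars.rstrip xs := by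
  simp [PySem.Chars.rstrip, hc]

theorem pv_flatten_snoc_eq_join (rows : List (List Char)) (c : Char) (h : rows ≠ []) :
    (rows.map (fun r => r ++ [c])).flatten = PySem.Chars.join [c] rows ++ [c] := by
  induction rows with
  | nil => simp at h
  | cons r rs ih =>
    cases rs with
    | nil => simp [PySem.Chars.join, List.intercalate]
    | cons r' t =>
      simp only [List.map_cons, List.flatten_cons] at ih ⊢
      rw [ih (by simp)]
      simp [PySem.Chars.join, List.intercalate]

theorem pv_enumerate_eq (xs : List (List Int)) (s : Int) :
    PySem.List.enumerate xs s = (List.range xs.length).map (fun (k : Nat) => (s + (k : Int), xs[k]!)) := by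
  induction xs generalizing s with
  | nil => simp [PySem.List.enumerate]
  | cons x t ih =>
    rw [PySem.List.enumerate_cons, ih]
    simp [List.range_succ_eq_map, List.map_map, Function.comp]
    intro a _; omega

theorem pv_fmt_nil (margin : Int) : pvFmt margin [] = pvSp (margin + 1) := by
  norm_num [pvFmt]

theorem pv_strA_eq (v_max i : Nat) (v : List Int) (hi : i < v_max) (hv : v.length ≤ v_max) :
    (if (i : Int) ≥ (v_max : Int) - (v.length : Int) then
        PySem.Int.toChars ((PySem.List.pyGet? v ((i : Int) + (v.length : Int) - (v_max : Int))).getD 0)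
      else []) =
    (List.replicate (v_max - v.length) ([] : List Char) ++ v.map PySem.Int.toChars).getD i [] := by
  rw [List.getD_eq_getElem?_getD]
  by_cases h : v_max - v.length ≤ i
  · have hj : ((i : Int) + (v.length : Int) - (v_max : Int)) = ((i - (v_max - v.length) : Nat) : Int) := by omega
    have hjlt : i - (v_max - v.length) < v.length := by omega
    rw [if_pos (by omega), hj, PySem.List.pyGet?_natCast,
        List.getElem?_append_right (by simpa using h)]
    simp [hjlt]
  · rw [if_neg (by omega), List.getElem?_append_left (by simpa using (by omega : i < v_max - v.length))]
    simp [Nat.lt_of_not_le h]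

-- canonical row list (row-major form that both ports reduce to)
def pvRowsOf (solution : List (List Int)) (vertical_hints : List (List Int)) (horizontal_hints : List (List Int)) (margin : Int) : List (List Char) :=
  let v_max : Nat := (vertical_hints.map (fun v => v.length)).foldl max 0
  let h_max : Nat := (horizontal_hints.map (fun h => h.length)).foldl max 0
  ((List.range v_max).map (fun (i : Nat) =>
    pvRep (pvFmt margin []) h_max ++
      ((vertical_hints.map (fun v => List.replicate (v_max - v.length) ([] : List Char) ++ v.map PySem.Int.toChars)).map
        (fun col => pvFmt margin (col.getD i []))).flatten))
  ++ ((List.range horizontal_hints.length).map (fun (y : Nat) =>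
    ((List.replicate (h_max - (horizontal_hints.getD y []).length) ([] : List Char) ++
        (horizontal_hints.getD y []).map PySem.Int.toChars).map (pvFmt margin)).flatten ++
    ((List.range vertical_hints.length).map (fun (x : Nat) =>
      (if ((PySem.List.pyGet? ((PySem.List.pyGet? solution (x : Int)).getD []) (y : Int)).getD 0) ≠ 0 then ['■'] else ['□']) ++ pvSp margin)).flatten))

theorem pv_a_eq (solution : List (List Int)) (vertical_hints : List (List Int)) (horizontal_hints : List (List Int)) (margin : Int) :
    generate_pretty_str solution vertical_hints horizontal_hints margin =
    String.mk (PySem.Chars.rstrip (((pvRowsOf solution vertical_hints horizontal_hints margin).map (fun r => r ++ ['\n'])).flatten)) := by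
  unfold generate_pretty_str pvRowsOf
  simp only [List.append_assoc, PySem.List.foldl_append_eq_flatMap, List.nil_append,
             List.map_append, List.map_map, List.flatten_append, List.flatMap_def]
  congr 2
  congr 1
  · apply congrArg
    apply List.map_congr_left
    intro i hi
    have hi' : i < (vertical_hints.map (fun v => v.length)).foldl max 0 := List.mem_range.mp hi
    simp only [Function.comp_def, List.append_assoc]
    rw [pv_fmt_nil]
    congr 2
    apply congrArg
    apply List.map_congr_left
    intro v hv
    have hvle : v.length ≤ (vertical_hints.map (fun v => v.length)).foldl max 0 := by
      rw [List.foldl_map]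
      exact (PySem.List.le_foldl_max_nat vertical_hints (fun v => v.length) 0).2 v hv
    rw [pv_strA_eq _ _ _ hi' hvle]
    simp [pvFmt]
  · apply congrArg
    apply List.map_congr_left
    intro y hy
    simp [Function.comp_def, pvFmt, pvRep, List.map_replicate,
          PySem.List.pyGet?_natCast, List.getD_eq_getElem?_getD, List.append_assoc]

theorem pv_map_range_getD {β : Type} (xs : List (List Char)) (F : List Char → β) :
    (List.range xs.length).map (fun c => F (xs.getD c [])) = xs.map F := by
  apply List.ext_getElem
  · simp
  · intro i h1 h2
    simp only [List.length_map] at h2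
    simp [List.getD_eq_getElem?_getD, List.getElem?_eq_getElem h2]

theorem pv_map_range_get {β : Type} (xs : List (List Int)) (F : List Int → β) :
    (List.range xs.length).map (fun k => F xs[k]!) = xs.map F := by
  apply List.ext_getElem
  · simp
  · intro i h1 h2
    simp only [List.length_map] at h2
    simp [List.getElem!_eq_getElem?_getD, List.getElem?_eq_getElem h2]

theorem pv_alt_eq (solution : List (List Int)) (vertical_hints : List (List Int)) (horizontal_hints : List (List Int)) (margin : Int) :
    generate_pretty_str_alt solution vertical_hints horizontal_hints margin =
    String.mk (PySem.Chars.rstrip (PySem.Chars.join ['\n'] (pvRowsOf solution vertical_hints horizontal_hints margin))) := by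
  unfold generate_pretty_str_alt pvRowsOf
  dsimp only
  set V := (vertical_hints.map (fun v => v.length)).foldl max 0 with hV
  set Hm := (horizontal_hints.map (fun h => h.length)).foldl max 0 with hHm
  have hVle : ∀ v ∈ vertical_hints, v.length ≤ V := by
    intro v hv
    rw [hV, List.foldl_map]
    exact (PySem.List.le_foldl_max_nat vertical_hints (fun v => v.length) 0).2 v hv
  have hHle : ∀ h ∈ horizontal_hints, h.length ≤ Hm := by
    intro h hh
    rw [hHm, List.foldl_map]
    exact (PySem.List.le_foldl_max_nat horizontal_hints (fun h => h.length) 0).2 h hh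
  congr 3
  rw [List.range_add, List.map_append, List.map_map]
  congr 1
  -- header rows
  · apply List.map_congr_left
    intro i hi
    have hi' : i < V := List.mem_range.mp hi
    rw [List.map_append, List.flatten_append]
    congr 1
    -- hint columns are blank in the header region
    · rw [List.map_map,
          List.map_congr_left (g := fun (_ : Nat) => pvFmt margin []) (by
            intro c _
            simp [List.getD_eq_getElem?_getD, List.getElem?_append_left, hi'])]
      simp [pvRep, List.map_const']
    -- vertical-hint columns: the board part is cut off, leaving the padded hint column
    · rw [pv_enumerate_eq, List.map_map, List.map_map,
          List.map_congr_left (g := fun (k : Nat) =>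
            (fun v => pvFmt margin ((List.replicate (V - v.length) ([] : List Char) ++
              v.map PySem.Int.toChars).getD i [])) vertical_hints[k]!) (by
            intro k hk
            have hk' : k < vertical_hints.length := List.mem_range.mp hk
            have he : vertical_hints[k]! = vertical_hints[k] := by
              simp [List.getElem!_eq_getElem?_getD, List.getElem?_eq_getElem hk']
            have hle : vertical_hints[k]!.length ≤ V := by
              rw [he]; exact hVle _ (List.getElem_mem hk')
            simp only [Function.comp_def]
            congr 1
            rw [List.getD_eq_getElem?_getD, List.getD_eq_getElem?_getD,
                List.getElem?_append_left (by simp; omega)])]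
      rw [List.map_map]
      exact congrArg List.flatten (pv_map_range_get vertical_hints
        (fun v => pvFmt margin ((List.replicate (V - v.length) ([] : List Char) ++
          v.map PySem.Int.toChars).getD i [])))
  -- body rows
  · apply List.map_congr_left
    intro y hy
    have hy' : y < horizontal_hints.length := List.mem_range.mp hy
    have hgy : horizontal_hints.getD y [] = horizontal_hints[y] := by
      simp [List.getD_eq_getElem?_getD, List.getElem?_eq_getElem hy']
    have hley : horizontal_hints[y].length ≤ Hm := hHle _ (List.getElem_mem hy')
    simp only [Function.comp_def]
    conv_lhs => rw [List.map_append, List.flatten_append]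
    refine congrArg₂ (fun (a b : List Char) => a ++ b) ?_ ?_
    -- hint columns give the left-padded horizontal hint cells of row y
    · rw [List.map_map,
          List.map_congr_left (g := fun (c : Nat) =>
            pvFmt margin ((List.replicate (Hm - horizontal_hints[y].length) ([] : List Char) ++
              horizontal_hints[y].map PySem.Int.toChars).getD c [])) (by
            intro c hc
            have hc' : c < Hm := List.mem_range.mp hc
            simp only [Function.comp_def]
            congr 1
            rw [List.getD_eq_getElem?_getD,
                List.getElem?_append_right (by simp),
                List.length_replicate, Nat.add_sub_cancel_left,
                List.getElem?_map, List.getElem?_eq_getElem hy']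
            simp only [Option.map_some, Option.getD_some]
            rw [List.getD_eq_getElem?_getD] at *
            exact pv_strA_eq Hm c horizontal_hints[y] hc' hley)]
      rw [hgy,
          show List.range Hm = List.range ((List.replicate (Hm - horizontal_hints[y].length) ([] : List Char) ++
            horizontal_hints[y].map PySem.Int.toChars).length) from by congr 1; simp; omega]
      exact congrArg List.flatten (pv_map_range_getD _ (pvFmt margin))
    -- vertical columns give the board cells of row y
    · rw [pv_enumerate_eq, List.map_map, List.map_map]
      apply congrArg
      apply List.map_congr_left
      intro k hk
      have hk' : k < vertical_hints.length := List.mem_range.mp hk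
      have he : vertical_hints[k]! = vertical_hints[k] := by
        simp [List.getElem!_eq_getElem?_getD, List.getElem?_eq_getElem hk']
      have hle : vertical_hints[k]!.length ≤ V := by
        rw [he]; exact hVle _ (List.getElem_mem hk')
      simp only [Function.comp_def]
      rw [List.getD_eq_getElem?_getD,
          List.getElem?_append_right (by
            simp only [List.length_append, List.length_replicate, List.length_map]; omega),
          List.getElem?_map, List.length_append, List.length_replicate, List.length_map]
      have hidx : V + y - (V - vertical_hints[k]!.length + vertical_hints[k]!.length) = y := by omega
      rw [hidx, List.getElem?_range hy']
      simp only [Option.map_some, Option.getD_some, zero_add]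
      split <;> rename_i hcell <;>
        · simp only [pvFmt, pvSp, List.length_cons, List.length_nil]
          congr 2
          omega

-- ===== VERDICT =====
theorem generate_pretty_str_spec : Claim_equal_generate_pretty_str := by
  intro solution vertical_hints horizontal_hints margin _hdom hpre
  unfold Spec_generate_pretty_str
  obtain ⟨hv, hh, -, -⟩ := hpre
  have hne : pvRowsOf solution vertical_hints horizontal_hints margin ≠ [] := by
    unfold pvRowsOf
    simp [List.range_eq_nil, List.length_eq_zero_iff, hh]
  rw [pv_a_eq, pv_alt_eq, pv_flatten_snoc_eq_join _ _ hne,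
      pv_rstrip_snoc_space _ _ (by decide)]
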